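-- pv_equiv track=rewrite | github.com/harshmandan/AlbumArtGeneratorAPI | improcess.py | prepare_image
-- ===== SOURCE A (Python) =====
-- def prepare_image(somelist):
-- 	count=0
-- 	finalitem = ""
-- 	for item in somelist:
-- 		if((count+len(item))>85):
-- 			break
-- 		else:
-- 			finalitem = finalitem + item + " "
-- 			count = count + len(item)
-- 	return finalitem
-- ===== SOURCE B (Python) =====
-- def prepare_image(somelist):
--     # pass 1: find k = length of longest prefix whose cumulative length stays <= 85
--     total = 0
--     k = 0
--     for item in somelist:
--         total += len(item)
--         if total > 85:
--             break
--         k += 1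
--     # pass 2: emit
--     return "".join(item + " " for item in somelist[:k])
-- ===== Notes on version B (the rewrite author's own statement) =====
-- stated objective: alternative
-- what changed: Replaces the fused accumulate-and-concatenate loop with two passes: first compute the cut index k (longest prefix of cumulative length <= 85), then build the result with a single join over somelist[:k].
import Mathlib
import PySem

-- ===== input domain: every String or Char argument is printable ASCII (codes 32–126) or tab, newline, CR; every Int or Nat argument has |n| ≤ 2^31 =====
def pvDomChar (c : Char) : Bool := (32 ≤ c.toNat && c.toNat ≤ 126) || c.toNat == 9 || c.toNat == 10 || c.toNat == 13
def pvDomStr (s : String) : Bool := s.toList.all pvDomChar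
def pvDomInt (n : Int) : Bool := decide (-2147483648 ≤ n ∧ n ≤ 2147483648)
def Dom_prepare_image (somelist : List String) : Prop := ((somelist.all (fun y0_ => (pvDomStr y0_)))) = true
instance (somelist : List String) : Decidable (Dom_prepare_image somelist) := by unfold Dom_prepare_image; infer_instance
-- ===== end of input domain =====

-- B replaces A's fused accumulate-and-concatenate loop by a two-pass decomposition:
-- compute the cut index k first, then emit the prefix with a single join (objective: alternative).


-- ===== PORT A =====
-- A's loop: carry (count, finalitem), break when count + len(item) > 85
def prepGoA (l : List String) (count : Int) (finalitem : String) : String :=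
  match l with
  | [] => finalitem
  | item :: rest =>
    if count + PySem.Str.len item > 85 then finalitem
    else prepGoA rest (count + PySem.Str.len item) (finalitem ++ item ++ " ")

def prepare_image (somelist : List String) : String := prepGoA somelist 0 ""

-- ===== PORT B =====
-- pass 1 of Source B: find k, the length of the longest prefix with cumulative length ≤ 85
def prepCut (l : List String) (total : Int) (k : Nat) : Nat :=
  match l with
  | [] => k
  | item :: rest =>
    let t := total + PySem.Str.len item
    if t > 85 then k else prepCut rest t (k + 1)

-- pass 2 of Source B: "".join(item + " " for item in somelist[:k])
def prepare_image_alt (somelist : List String) : String :=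
  String.join ((somelist.take (prepCut somelist 0 0)).map (fun item => item ++ " "))

-- ===== PRECONDITION & SPEC =====
def Spec_prepare_image (somelist : List String) (out : String) : Prop := out = prepare_image_alt somelist
instance (somelist : List String) (out : String) : Decidable (Spec_prepare_image somelist out) := by unfold Spec_prepare_image; infer_instance

-- ===== CLAIM (what is proved, stated in full; the proofs are below) =====
def Claim_equal_prepare_image : Prop := ∀ (somelist : List String), Dom_prepare_image somelist → Spec_prepare_image somelist (prepare_image somelist)

-- ===== LEMMAS AND PROOFS =====
theorem prepCut_shift (l : List String) (t : Int) (k : Nat) :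
    prepCut l t (k + 1) = prepCut l t k + 1 := by
  induction l generalizing t k with
  | nil => simp [prepCut]
  | cons x xs ih =>
    simp only [prepCut]
    split_ifs with h
    · rfl
    · exact ih _ _

theorem prepGoA_eq (l : List String) (c : Int) (f : String) :
    prepGoA l c f = f ++ String.join ((l.take (prepCut l c 0)).map (fun item => item ++ " ")) := by
  induction l generalizing c f with
  | nil => simp [prepGoA, prepCut, String.join]
  | cons x xs ih =>
    simp only [prepGoA, prepCut]
    split_ifs with h
    · simp [String.join]
    · rw [ih, prepCut_shift]
      have hsp : ∀ l : List Char, " " ++ String.ofList l = String.ofList (' ' :: l) := by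
        intro l; rw [← List.singleton_append, String.ofList_append]
      simp [List.take_succ_cons, String.join_eq, String.append_assoc, hsp]

-- ===== VERDICT (by name: the statement is the Claim_ definition above) =====
theorem prepare_image_spec : Claim_equal_prepare_image := by
  intro l _
  unfold Spec_prepare_image prepare_image prepare_image_alt
  simpa using prepGoA_eq l 0 ""
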